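-- pv_equiv track=rewrite | github.com/ShivUP32/aira | pipeline/04_tag_chapters.py | tag_chapter
-- ===== SOURCE A (Python) =====
-- from typing import Dict, List
--
-- CHAPTER_KEYWORDS: Dict[str, List[str]] = {
--     # Physics
--     "Electric Charges and Fields": ["coulomb", "electric field", "gauss", "flux", "charge distribution", "dipole"],
--     "Electrostatic Potential": ["potential", "capacitor", "capacitance", "equipotential", "dielectric"],
--     "Current Electricity": ["resistance", "ohm", "kirchhoff", "drift velocity", "resistivity", "cell", "emf", "wheatstone"],
--     "Moving Charges and Magnetism": ["magnetic force", "biot-savart", "ampere", "solenoid", "cyclotron", "lorentz"],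
--     "Electromagnetic Induction": ["faraday", "lenz", "induced emf", "flux", "eddy current", "mutual inductance"],
--     "Alternating Current": ["rms", "ac circuit", "impedance", "resonance", "transformer", "reactance"],
--     "Ray Optics": ["mirror", "lens", "refraction", "total internal reflection", "prism", "snell"],
--     "Wave Optics": ["interference", "diffraction", "polarisation", "young", "fringe width"],
--     "Dual Nature": ["photoelectric", "work function", "de broglie", "wavelength of electron"],
--     "Atoms": ["bohr", "hydrogen spectrum", "energy level", "balmer", "lyman"],
--     "Nuclei": ["nuclear", "radioactive", "half life", "binding energy", "fission", "fusion"],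
--     # Chemistry
--     "Solutions": ["molality", "molarity", "vapour pressure", "osmosis", "raoult"],
--     "Electrochemistry": ["electrode", "galvanic", "electrolysis", "nernst", "conductance", "kohlrausch"],
--     "Chemical Kinetics": ["rate of reaction", "order", "activation energy", "arrhenius", "half life"],
--     "Coordination Compounds": ["ligand", "complex", "cfse", "isomerism", "coordination number"],
--     "Haloalkanes and Haloarenes": ["sn1", "sn2", "nucleophilic", "halide", "grignard"],
--     "Alcohols, Phenols and Ethers": ["alcohol", "phenol", "ether", "oxidation", "dehydration"],
--     # Mathematics
--     "Continuity and Differentiability": ["continuous", "differentiable", "rolle", "mean value", "logarithmic differentiation"],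
--     "Application of Derivatives": ["maxima", "minima", "tangent", "normal", "rate of change", "increasing"],
--     "Integrals": ["integral", "integration", "definite", "indefinite", "by parts", "substitution"],
--     "Differential Equations": ["differential equation", "homogeneous", "linear de", "variable separable"],
--     "Vector Algebra": ["vector", "dot product", "cross product", "unit vector", "coplanar"],
--     "Three Dimensional Geometry": ["direction cosines", "plane", "line in 3d", "skew lines"],
--     "Probability": ["bayes", "conditional probability", "random variable", "binomial distribution"],
-- }
--
-- def tag_chapter(question_text: str, subject: str) -> str:
--     text_lower = question_text.lower()
--     best_match = ""
--     best_score = 0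
--
--     for chapter, keywords in CHAPTER_KEYWORDS.items():
--         score = sum(1 for kw in keywords if kw in text_lower)
--         if score > best_score:
--             best_score = score
--             best_match = chapter
--
--     return best_match if best_score > 0 else "General"
-- ===== SOURCE B (Python) =====
-- # Inverted index: flat (keyword, chapter) list in CHAPTER_KEYWORDS insertion order.
-- KEYWORD_TO_CHAPTER = [
--     ('coulomb', 'Electric Charges and Fields'),
--     ('electric field', 'Electric Charges and Fields'),
--     ('gauss', 'Electric Charges and Fields'),
--     ('flux', 'Electric Charges and Fields'),
--     ('charge distribution', 'Electric Charges and Fields'),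
--     ('dipole', 'Electric Charges and Fields'),
--     ('potential', 'Electrostatic Potential'),
--     ('capacitor', 'Electrostatic Potential'),
--     ('capacitance', 'Electrostatic Potential'),
--     ('equipotential', 'Electrostatic Potential'),
--     ('dielectric', 'Electrostatic Potential'),
--     ('resistance', 'Current Electricity'),
--     ('ohm', 'Current Electricity'),
--     ('kirchhoff', 'Current Electricity'),
--     ('drift velocity', 'Current Electricity'),
--     ('resistivity', 'Current Electricity'),
--     ('cell', 'Current Electricity'),
--     ('emf', 'Current Electricity'),
--     ('wheatstone', 'Current Electricity'),
--     ('magnetic force', 'Moving Charges and Magnetism'),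
--     ('biot-savart', 'Moving Charges and Magnetism'),
--     ('ampere', 'Moving Charges and Magnetism'),
--     ('solenoid', 'Moving Charges and Magnetism'),
--     ('cyclotron', 'Moving Charges and Magnetism'),
--     ('lorentz', 'Moving Charges and Magnetism'),
--     ('faraday', 'Electromagnetic Induction'),
--     ('lenz', 'Electromagnetic Induction'),
--     ('induced emf', 'Electromagnetic Induction'),
--     ('flux', 'Electromagnetic Induction'),
--     ('eddy current', 'Electromagnetic Induction'),
--     ('mutual inductance', 'Electromagnetic Induction'),
--     ('rms', 'Alternating Current'),
--     ('ac circuit', 'Alternating Current'),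
--     ('impedance', 'Alternating Current'),
--     ('resonance', 'Alternating Current'),
--     ('transformer', 'Alternating Current'),
--     ('reactance', 'Alternating Current'),
--     ('mirror', 'Ray Optics'),
--     ('lens', 'Ray Optics'),
--     ('refraction', 'Ray Optics'),
--     ('total internal reflection', 'Ray Optics'),
--     ('prism', 'Ray Optics'),
--     ('snell', 'Ray Optics'),
--     ('interference', 'Wave Optics'),
--     ('diffraction', 'Wave Optics'),
--     ('polarisation', 'Wave Optics'),
--     ('young', 'Wave Optics'),
--     ('fringe width', 'Wave Optics'),
--     ('photoelectric', 'Dual Nature'),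
--     ('work function', 'Dual Nature'),
--     ('de broglie', 'Dual Nature'),
--     ('wavelength of electron', 'Dual Nature'),
--     ('bohr', 'Atoms'),
--     ('hydrogen spectrum', 'Atoms'),
--     ('energy level', 'Atoms'),
--     ('balmer', 'Atoms'),
--     ('lyman', 'Atoms'),
--     ('nuclear', 'Nuclei'),
--     ('radioactive', 'Nuclei'),
--     ('half life', 'Nuclei'),
--     ('binding energy', 'Nuclei'),
--     ('fission', 'Nuclei'),
--     ('fusion', 'Nuclei'),
--     ('molality', 'Solutions'),
--     ('molarity', 'Solutions'),
--     ('vapour pressure', 'Solutions'),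
--     ('osmosis', 'Solutions'),
--     ('raoult', 'Solutions'),
--     ('electrode', 'Electrochemistry'),
--     ('galvanic', 'Electrochemistry'),
--     ('electrolysis', 'Electrochemistry'),
--     ('nernst', 'Electrochemistry'),
--     ('conductance', 'Electrochemistry'),
--     ('kohlrausch', 'Electrochemistry'),
--     ('rate of reaction', 'Chemical Kinetics'),
--     ('order', 'Chemical Kinetics'),
--     ('activation energy', 'Chemical Kinetics'),
--     ('arrhenius', 'Chemical Kinetics'),
--     ('half life', 'Chemical Kinetics'),
--     ('ligand', 'Coordination Compounds'),
--     ('complex', 'Coordination Compounds'),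
--     ('cfse', 'Coordination Compounds'),
--     ('isomerism', 'Coordination Compounds'),
--     ('coordination number', 'Coordination Compounds'),
--     ('sn1', 'Haloalkanes and Haloarenes'),
--     ('sn2', 'Haloalkanes and Haloarenes'),
--     ('nucleophilic', 'Haloalkanes and Haloarenes'),
--     ('halide', 'Haloalkanes and Haloarenes'),
--     ('grignard', 'Haloalkanes and Haloarenes'),
--     ('alcohol', 'Alcohols, Phenols and Ethers'),
--     ('phenol', 'Alcohols, Phenols and Ethers'),
--     ('ether', 'Alcohols, Phenols and Ethers'),
--     ('oxidation', 'Alcohols, Phenols and Ethers'),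
--     ('dehydration', 'Alcohols, Phenols and Ethers'),
--     ('continuous', 'Continuity and Differentiability'),
--     ('differentiable', 'Continuity and Differentiability'),
--     ('rolle', 'Continuity and Differentiability'),
--     ('mean value', 'Continuity and Differentiability'),
--     ('logarithmic differentiation', 'Continuity and Differentiability'),
--     ('maxima', 'Application of Derivatives'),
--     ('minima', 'Application of Derivatives'),
--     ('tangent', 'Application of Derivatives'),
--     ('normal', 'Application of Derivatives'),
--     ('rate of change', 'Application of Derivatives'),
--     ('increasing', 'Application of Derivatives'),
--     ('integral', 'Integrals'),
--     ('integration', 'Integrals'),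
--     ('definite', 'Integrals'),
--     ('indefinite', 'Integrals'),
--     ('by parts', 'Integrals'),
--     ('substitution', 'Integrals'),
--     ('differential equation', 'Differential Equations'),
--     ('homogeneous', 'Differential Equations'),
--     ('linear de', 'Differential Equations'),
--     ('variable separable', 'Differential Equations'),
--     ('vector', 'Vector Algebra'),
--     ('dot product', 'Vector Algebra'),
--     ('cross product', 'Vector Algebra'),
--     ('unit vector', 'Vector Algebra'),
--     ('coplanar', 'Vector Algebra'),
--     ('direction cosines', 'Three Dimensional Geometry'),
--     ('plane', 'Three Dimensional Geometry'),
--     ('line in 3d', 'Three Dimensional Geometry'),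
--     ('skew lines', 'Three Dimensional Geometry'),
--     ('bayes', 'Probability'),
--     ('conditional probability', 'Probability'),
--     ('random variable', 'Probability'),
--     ('binomial distribution', 'Probability'),
-- ]
--
-- def tag_chapter(question_text: str, subject: str) -> str:
--     text_lower = question_text.lower()
--     # one pass over the inverted index, building a chapter -> hit-count table
--     scores = {}
--     for kw, ch in KEYWORD_TO_CHAPTER:
--         if kw in text_lower:
--             scores[ch] = scores.get(ch, 0) + 1
--     best, best_score = "General", 0
--     for ch, sc in scores.items():
--         if sc > best_score:
--             best, best_score = ch, sc
--     return best
-- ===== Notes on version B (the rewrite author's own statement) =====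
-- stated objective: alternative
-- what changed: Replaces A's dict-of-keyword-lists with inline per-chapter best tracking by a different data structure: a flat inverted (keyword, chapter) index scanned in one keyword-driven pass that populates an explicit chapter->score table, from which the earliest-inserted maximal chapter is then selected (General if all scores are 0).
import Mathlib
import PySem

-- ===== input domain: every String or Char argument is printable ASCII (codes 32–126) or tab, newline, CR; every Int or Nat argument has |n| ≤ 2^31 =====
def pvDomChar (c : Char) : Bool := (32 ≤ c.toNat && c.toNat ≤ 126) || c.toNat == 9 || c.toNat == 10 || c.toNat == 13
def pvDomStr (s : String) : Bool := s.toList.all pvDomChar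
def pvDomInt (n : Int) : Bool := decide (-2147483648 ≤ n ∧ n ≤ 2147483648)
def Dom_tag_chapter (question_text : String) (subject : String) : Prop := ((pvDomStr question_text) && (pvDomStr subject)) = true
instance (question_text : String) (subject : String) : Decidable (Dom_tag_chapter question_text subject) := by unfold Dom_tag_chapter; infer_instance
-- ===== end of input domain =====

-- B replaces A's per-chapter dict of keyword lists and inline best tracking by a flat inverted
-- (keyword, chapter) index scanned in one pass into a chapter->score table (objective: alternative decomposition, same cost).

-- ===== PORT A =====
-- CHAPTER_KEYWORDS as an insertion-ordered association list (A's module constant)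
def chapterKeywords : List (String × List String) := [
  ("Electric Charges and Fields", ["coulomb", "electric field", "gauss", "flux", "charge distribution", "dipole"]),
  ("Electrostatic Potential", ["potential", "capacitor", "capacitance", "equipotential", "dielectric"]),
  ("Current Electricity", ["resistance", "ohm", "kirchhoff", "drift velocity", "resistivity", "cell", "emf", "wheatstone"]),
  ("Moving Charges and Magnetism", ["magnetic force", "biot-savart", "ampere", "solenoid", "cyclotron", "lorentz"]),
  ("Electromagnetic Induction", ["faraday", "lenz", "induced emf", "flux", "eddy current", "mutual inductance"]),
  ("Alternating Current", ["rms", "ac circuit", "impedance", "resonance", "transformer", "reactance"]),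
  ("Ray Optics", ["mirror", "lens", "refraction", "total internal reflection", "prism", "snell"]),
  ("Wave Optics", ["interference", "diffraction", "polarisation", "young", "fringe width"]),
  ("Dual Nature", ["photoelectric", "work function", "de broglie", "wavelength of electron"]),
  ("Atoms", ["bohr", "hydrogen spectrum", "energy level", "balmer", "lyman"]),
  ("Nuclei", ["nuclear", "radioactive", "half life", "binding energy", "fission", "fusion"]),
  ("Solutions", ["molality", "molarity", "vapour pressure", "osmosis", "raoult"]),
  ("Electrochemistry", ["electrode", "galvanic", "electrolysis", "nernst", "conductance", "kohlrausch"]),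
  ("Chemical Kinetics", ["rate of reaction", "order", "activation energy", "arrhenius", "half life"]),
  ("Coordination Compounds", ["ligand", "complex", "cfse", "isomerism", "coordination number"]),
  ("Haloalkanes and Haloarenes", ["sn1", "sn2", "nucleophilic", "halide", "grignard"]),
  ("Alcohols, Phenols and Ethers", ["alcohol", "phenol", "ether", "oxidation", "dehydration"]),
  ("Continuity and Differentiability", ["continuous", "differentiable", "rolle", "mean value", "logarithmic differentiation"]),
  ("Application of Derivatives", ["maxima", "minima", "tangent", "normal", "rate of change", "increasing"]),
  ("Integrals", ["integral", "integration", "definite", "indefinite", "by parts", "substitution"]),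
  ("Differential Equations", ["differential equation", "homogeneous", "linear de", "variable separable"]),
  ("Vector Algebra", ["vector", "dot product", "cross product", "unit vector", "coplanar"]),
  ("Three Dimensional Geometry", ["direction cosines", "plane", "line in 3d", "skew lines"]),
  ("Probability", ["bayes", "conditional probability", "random variable", "binomial distribution"])]

def tag_chapter (question_text : String) (subject : String) : String :=
  let text_lower := PySem.Str.lower question_text
  -- for chapter, keywords in CHAPTER_KEYWORDS.items(): score = sum(...); if score > best_score: update
  let st := chapterKeywords.foldl
    (fun (st : String × Int) p =>
      let score : Int := p.2.foldl (fun a kw => if PySem.Str.isIn kw text_lower then a + 1 else a) 0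
      if st.2 < score then (p.1, score) else st)
    ("", 0)
  if 0 < st.2 then st.1 else "General"

-- ===== PORT B =====
-- KEYWORD_TO_CHAPTER: B's own flat inverted-index constant (keyword, chapter)
def keywordPairs : List (String × String) := [
  ("coulomb", "Electric Charges and Fields"),
  ("electric field", "Electric Charges and Fields"),
  ("gauss", "Electric Charges and Fields"),
  ("flux", "Electric Charges and Fields"),
  ("charge distribution", "Electric Charges and Fields"),
  ("dipole", "Electric Charges and Fields"),
  ("potential", "Electrostatic Potential"),
  ("capacitor", "Electrostatic Potential"),
  ("capacitance", "Electrostatic Potential"),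
  ("equipotential", "Electrostatic Potential"),
  ("dielectric", "Electrostatic Potential"),
  ("resistance", "Current Electricity"),
  ("ohm", "Current Electricity"),
  ("kirchhoff", "Current Electricity"),
  ("drift velocity", "Current Electricity"),
  ("resistivity", "Current Electricity"),
  ("cell", "Current Electricity"),
  ("emf", "Current Electricity"),
  ("wheatstone", "Current Electricity"),
  ("magnetic force", "Moving Charges and Magnetism"),
  ("biot-savart", "Moving Charges and Magnetism"),
  ("ampere", "Moving Charges and Magnetism"),
  ("solenoid", "Moving Charges and Magnetism"),
  ("cyclotron", "Moving Charges and Magnetism"),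
  ("lorentz", "Moving Charges and Magnetism"),
  ("faraday", "Electromagnetic Induction"),
  ("lenz", "Electromagnetic Induction"),
  ("induced emf", "Electromagnetic Induction"),
  ("flux", "Electromagnetic Induction"),
  ("eddy current", "Electromagnetic Induction"),
  ("mutual inductance", "Electromagnetic Induction"),
  ("rms", "Alternating Current"),
  ("ac circuit", "Alternating Current"),
  ("impedance", "Alternating Current"),
  ("resonance", "Alternating Current"),
  ("transformer", "Alternating Current"),
  ("reactance", "Alternating Current"),
  ("mirror", "Ray Optics"),
  ("lens", "Ray Optics"),
  ("refraction", "Ray Optics"),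
  ("total internal reflection", "Ray Optics"),
  ("prism", "Ray Optics"),
  ("snell", "Ray Optics"),
  ("interference", "Wave Optics"),
  ("diffraction", "Wave Optics"),
  ("polarisation", "Wave Optics"),
  ("young", "Wave Optics"),
  ("fringe width", "Wave Optics"),
  ("photoelectric", "Dual Nature"),
  ("work function", "Dual Nature"),
  ("de broglie", "Dual Nature"),
  ("wavelength of electron", "Dual Nature"),
  ("bohr", "Atoms"),
  ("hydrogen spectrum", "Atoms"),
  ("energy level", "Atoms"),
  ("balmer", "Atoms"),
  ("lyman", "Atoms"),
  ("nuclear", "Nuclei"),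
  ("radioactive", "Nuclei"),
  ("half life", "Nuclei"),
  ("binding energy", "Nuclei"),
  ("fission", "Nuclei"),
  ("fusion", "Nuclei"),
  ("molality", "Solutions"),
  ("molarity", "Solutions"),
  ("vapour pressure", "Solutions"),
  ("osmosis", "Solutions"),
  ("raoult", "Solutions"),
  ("electrode", "Electrochemistry"),
  ("galvanic", "Electrochemistry"),
  ("electrolysis", "Electrochemistry"),
  ("nernst", "Electrochemistry"),
  ("conductance", "Electrochemistry"),
  ("kohlrausch", "Electrochemistry"),
  ("rate of reaction", "Chemical Kinetics"),
  ("order", "Chemical Kinetics"),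
  ("activation energy", "Chemical Kinetics"),
  ("arrhenius", "Chemical Kinetics"),
  ("half life", "Chemical Kinetics"),
  ("ligand", "Coordination Compounds"),
  ("complex", "Coordination Compounds"),
  ("cfse", "Coordination Compounds"),
  ("isomerism", "Coordination Compounds"),
  ("coordination number", "Coordination Compounds"),
  ("sn1", "Haloalkanes and Haloarenes"),
  ("sn2", "Haloalkanes and Haloarenes"),
  ("nucleophilic", "Haloalkanes and Haloarenes"),
  ("halide", "Haloalkanes and Haloarenes"),
  ("grignard", "Haloalkanes and Haloarenes"),
  ("alcohol", "Alcohols, Phenols and Ethers"),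
  ("phenol", "Alcohols, Phenols and Ethers"),
  ("ether", "Alcohols, Phenols and Ethers"),
  ("oxidation", "Alcohols, Phenols and Ethers"),
  ("dehydration", "Alcohols, Phenols and Ethers"),
  ("continuous", "Continuity and Differentiability"),
  ("differentiable", "Continuity and Differentiability"),
  ("rolle", "Continuity and Differentiability"),
  ("mean value", "Continuity and Differentiability"),
  ("logarithmic differentiation", "Continuity and Differentiability"),
  ("maxima", "Application of Derivatives"),
  ("minima", "Application of Derivatives"),
  ("tangent", "Application of Derivatives"),
  ("normal", "Application of Derivatives"),
  ("rate of change", "Application of Derivatives"),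
  ("increasing", "Application of Derivatives"),
  ("integral", "Integrals"),
  ("integration", "Integrals"),
  ("definite", "Integrals"),
  ("indefinite", "Integrals"),
  ("by parts", "Integrals"),
  ("substitution", "Integrals"),
  ("differential equation", "Differential Equations"),
  ("homogeneous", "Differential Equations"),
  ("linear de", "Differential Equations"),
  ("variable separable", "Differential Equations"),
  ("vector", "Vector Algebra"),
  ("dot product", "Vector Algebra"),
  ("cross product", "Vector Algebra"),
  ("unit vector", "Vector Algebra"),
  ("coplanar", "Vector Algebra"),
  ("direction cosines", "Three Dimensional Geometry"),
  ("plane", "Three Dimensional Geometry"),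
  ("line in 3d", "Three Dimensional Geometry"),
  ("skew lines", "Three Dimensional Geometry"),
  ("bayes", "Probability"),
  ("conditional probability", "Probability"),
  ("random variable", "Probability"),
  ("binomial distribution", "Probability")]

def tag_chapter_alt (question_text : String) (subject : String) : String :=
  let text_lower := PySem.Str.lower question_text
  -- for kw, ch in KEYWORD_TO_CHAPTER: if kw in text_lower: scores[ch] = scores.get(ch, 0) + 1
  let scores := keywordPairs.foldl
    (fun (d : PySem.Dict String Int) q =>
      if PySem.Str.isIn q.1 text_lower then d.insert q.2 (d.getD q.2 0 + 1) else d)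
    PySem.Dict.empty
  -- for ch, sc in scores.items(): if sc > best_score: best, best_score = ch, sc
  let st := scores.items.foldl
    (fun (st : String × Int) p => if st.2 < p.2 then (p.1, p.2) else st)
    ("General", 0)
  st.1

-- ===== PRECONDITION & SPEC =====
def Spec_tag_chapter (question_text : String) (subject : String) (out : String) : Prop := out = tag_chapter_alt question_text subject
instance (question_text : String) (subject : String) (out : String) : Decidable (Spec_tag_chapter question_text subject out) := by unfold Spec_tag_chapter; infer_instance

-- ===== CLAIM (what is proved, stated in full; the proofs are below) =====
def Claim_equal_tag_chapter : Prop := ∀ (question_text : String) (subject : String), Dom_tag_chapter question_text subject → Spec_tag_chapter question_text subject (tag_chapter question_text subject)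

-- ===== LEMMAS AND PROOFS =====

-- B's constant is exactly A's table flattened into (keyword, chapter) pairs in insertion order
theorem keywordPairs_eq :
    keywordPairs = chapterKeywords.flatMap (fun p => p.2.map (fun kw => (kw, p.1))) := by decide

-- a guarded fold is a fold over the filtered, projected list
theorem foldl_if_filter_map {α β γ : Type} (f : α → Bool) (h : α → γ) (g : β → γ → β)
    (l : List α) (init : β) :
    l.foldl (fun d q => if f q then g d (h q) else d) init =
    ((l.filter f).map h).foldl g init := by
  induction l generalizing init with
  | nil => rfl
  | cons x xs ih =>
    simp only [List.foldl_cons, List.filter_cons]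
    by_cases hx : f x
    · simp [hx, ih]
    · simp [hx, ih]

-- A's inner sum-loop counts the keywords that match
theorem foldl_count (f : String → Bool) (l : List String) (a : Int) :
    l.foldl (fun a kw => if f kw then a + 1 else a) a = a + ((l.filter f).length : Int) := by
  induction l generalizing a with
  | nil => simp
  | cons x xs ih =>
    simp only [List.foldl_cons, List.filter_cons]
    by_cases h : f x
    · simp only [h, if_true, ih, List.length_cons]
      push_cast; ring
    · simp [h, ih]

-- counting a constant-valued list
theorem count_map_const {α : Type} (l : List α) (c ch : String) :
    ((l.map (fun _ => c)).count ch) = if ch = c then l.length else 0 := by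
  induction l with
  | nil => simp
  | cons x xs ih =>
    simp only [List.map_cons, List.count_cons, ih, beq_iff_eq]
    by_cases h : ch = c
    · simp [h]
    · simp only [h, if_false]
      simp
      exact fun hc => h hc.symm

-- the distinct elements of a nonempty constant-valued list
theorem ofList_map_const {α : Type} (l : List α) (c : String) (h : l ≠ []) :
    PySem.Set.ofList (l.map (fun _ => c)) = [c] := by
  induction l with
  | nil => exact absurd rfl h
  | cons x xs ih =>
    rw [List.map_cons, PySem.Set.ofList_cons]
    by_cases hxs : xs = []
    · subst hxs; rfl
    · rw [ih hxs]
      have : PySem.Set.discard [c] c = ([] : List String) := by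
        rw [List.eq_nil_iff_forall_not_mem]
        intro y hy
        have := (PySem.Set.mem_discard _ _ _).mp hy
        simp at this
      rw [this]

-- the list of chapters hit by a matching keyword, with multiplicity, in flattened order
def hitsOf (f : String → Bool) (L : List (String × List String)) : List String :=
  L.flatMap (fun p => (p.2.filter f).map (fun _ => p.1))

-- the pairs B's guarded pass keeps project exactly to that hits list
theorem filtered_pairs_eq_hits (f : String → Bool) (L : List (String × List String)) :
    ((L.flatMap (fun p => p.2.map (fun kw => (kw, p.1)))).filter (fun q => f q.1)).map Prod.snd =
    hitsOf f L := by
  induction L with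
  | nil => rfl
  | cons p L ih =>
    simp only [hitsOf, List.flatMap_cons, List.filter_append, List.map_append] at *
    rw [ih]
    congr 1
    rw [List.filter_map, List.map_map]
    rfl

theorem mem_hitsOf (f : String → Bool) (L : List (String × List String)) (x : String)
    (hx : x ∈ hitsOf f L) : x ∈ L.map Prod.fst := by
  simp only [hitsOf, List.mem_flatMap, List.mem_map] at hx ⊢
  obtain ⟨p, hp, kw, _, rfl⟩ := hx
  exact ⟨p, hp, rfl⟩

-- distinct elements of the hits list = chapters (in order) with at least one matching keyword
theorem ofList_hitsOf (f : String → Bool) (L : List (String × List String))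
    (hnd : (L.map Prod.fst).Nodup) :
    PySem.Set.ofList (hitsOf f L) = (L.filter (fun p => !(p.2.filter f).isEmpty)).map Prod.fst := by
  induction L with
  | nil => simp [hitsOf, PySem.Set.ofList_nil]
  | cons p L ih =>
    simp only [List.map_cons, List.nodup_cons] at hnd
    have hrest := ih hnd.2
    have hgrp : hitsOf f (p :: L) = ((p.2.filter f).map (fun _ => p.1)) ++ hitsOf f L := by
      simp [hitsOf]
    rw [hgrp, PySem.Set.ofList_append]
    by_cases h : (p.2.filter f).isEmpty
    · have hempty : (p.2.filter f) = [] := List.isEmpty_iff.mp h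
      simp [hempty, PySem.Set.update_nil_left, hrest]
    · have hne : p.2.filter f ≠ [] := by simpa [List.isEmpty_iff] using h
      rw [ofList_map_const _ _ hne]
      have hdisj : ∀ x ∈ hitsOf f L, x ∉ ([p.1] : List String) := by
        intro x hx hmem
        simp only [List.mem_singleton] at hmem
        exact hnd.1 (hmem ▸ mem_hitsOf f L x hx)
      have hupd : PySem.Set.update [p.1] (hitsOf f L) =
          [p.1] ++ PySem.Set.ofList (hitsOf f L) := by
        rw [PySem.Set.update_eq_append_filter]
        congr 1
        apply List.filter_eq_self.mpr
        intro x hx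
        have hxm : x ∈ hitsOf f L := (PySem.Set.mem_ofList _ _).mp hx
        simp only [PySem.Set.contains_eq_listContains, Bool.not_eq_eq_eq_not, Bool.not_true,
          List.contains_eq_mem, decide_eq_false_iff_not]
        intro hc
        exact absurd (by simpa using hc) (fun hc' => hdisj x hxm (by simp [hc']))
      rw [hupd, hrest, List.filter_cons]
      simp [h]

-- number of occurrences of a chapter in the hits list = its score
theorem count_hitsOf (f : String → Bool) (L : List (String × List String))
    (hnd : (L.map Prod.fst).Nodup) (p : String × List String) (hp : p ∈ L) :
    ((hitsOf f L).count p.1 : Int) = ((p.2.filter f).length : Int) := by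
  induction L with
  | nil => cases hp
  | cons q L ih =>
    simp only [List.map_cons, List.nodup_cons] at hnd
    have hgrp : hitsOf f (q :: L) = ((q.2.filter f).map (fun _ => q.1)) ++ hitsOf f L := by
      simp [hitsOf]
    rw [hgrp, List.count_append]
    rcases List.mem_cons.mp hp with rfl | hmem
    · have hnot : (hitsOf f L).count p.1 = 0 := by
        rw [List.count_eq_zero]
        intro hc; exact hnd.1 (mem_hitsOf f L p.1 hc)
      rw [count_map_const, hnot, if_pos rfl]; simp
    · have hne : p.1 ≠ q.1 := by
        intro h; exact hnd.1 (h ▸ List.mem_map_of_mem hmem)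
      rw [count_map_const, if_neg hne]
      simpa using ih hnd.2 hmem

-- main selection lemma: A's fold over all chapters vs B's fold over the positive (chapter, score) items
theorem sel_main (sc : (String × List String) → Int) (pos : (String × List String) → Bool)
    (hsc : ∀ p, 0 ≤ sc p) (hposs : ∀ p, pos p = true ↔ 0 < sc p)
    (L : List (String × List String)) (bm bm' : String) (bs : Int)
    (hbs : 0 ≤ bs) (hpos : 0 < bs → bm = bm') (hz : bs = 0 → bm' = "General") :
    (if 0 < (L.foldl (fun (st : String × Int) p => if st.2 < sc p then (p.1, sc p) else st) (bm, bs)).2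
     then (L.foldl (fun (st : String × Int) p => if st.2 < sc p then (p.1, sc p) else st) (bm, bs)).1
     else "General") =
    (((L.filter pos).map (fun p => (p.1, sc p))).foldl
        (fun (st : String × Int) q => if st.2 < q.2 then (q.1, q.2) else st) (bm', bs)).1 := by
  induction L generalizing bm bm' bs with
  | nil =>
    simp only [List.foldl_nil, List.filter_nil, List.map_nil]
    by_cases h : 0 < bs
    · simp [h, hpos h]
    · have hz0 : bs = 0 := le_antisymm (by omega) hbs
      simp [h, hz hz0]
  | cons p L ih =>
    simp only [List.foldl_cons, List.filter_cons]
    by_cases hp : pos p = true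
    · have hps : 0 < sc p := (hposs p).mp hp
      rw [if_pos hp]
      simp only [List.map_cons, List.foldl_cons]
      by_cases hlt : bs < sc p
      · rw [if_pos hlt, if_pos hlt]
        exact ih p.1 p.1 (sc p) (le_of_lt hps) (fun _ => rfl) (by omega)
      · rw [if_neg hlt, if_neg hlt]
        exact ih bm bm' bs hbs hpos hz
    · have hps : sc p = 0 := by
        have h1 := (hposs p).not.mp (by simp [hp])
        have h2 := hsc p
        omega
      rw [if_neg hp]
      have hnlt : ¬ bs < sc p := by omega
      rw [if_neg hnlt]
      exact ih bm bm' bs hbs hpos hz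

-- chapter names are distinct
theorem chapters_nodup : (chapterKeywords.map Prod.fst).Nodup := by decide

-- ===== VERDICT (by name: the statement is the Claim_ definition above) =====
theorem tag_chapter_spec : Claim_equal_tag_chapter := by
  intro q s _
  unfold Spec_tag_chapter tag_chapter tag_chapter_alt
  simp only [foldl_count, zero_add]
  rw [keywordPairs_eq,
      foldl_if_filter_map (fun q' : String × String => PySem.Str.isIn q'.1 (PySem.Str.lower q))
        (Prod.snd : String × String → String)
        (fun (d : PySem.Dict String Int) (ch : String) => d.insert ch (d.getD ch 0 + 1)),
      filtered_pairs_eq_hits (fun kw => PySem.Str.isIn kw (PySem.Str.lower q)) chapterKeywords]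
  rw [PySem.Dict.foldl_insert_getD_add_one_eq_counter, PySem.Dict.items_counter]
  rw [ofList_hitsOf _ chapterKeywords chapters_nodup, List.map_map]
  rw [List.map_congr_left
        (g := fun p : String × List String =>
          (p.1, ((p.2.filter (fun kw => PySem.Str.isIn kw (PySem.Str.lower q))).length : Int)))
        (fun p hp => by
          simp only [Function.comp_apply]
          rw [count_hitsOf _ chapterKeywords chapters_nodup p (List.mem_of_mem_filter hp)])]
  exact sel_main
    (fun p => ((p.2.filter (fun kw => PySem.Str.isIn kw (PySem.Str.lower q))).length : Int))
    (fun p => !(p.2.filter (fun kw => PySem.Str.isIn kw (PySem.Str.lower q))).isEmpty)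
    (fun p => by positivity)
    (fun p => by simp [List.length_pos_iff])
    chapterKeywords "" "General" 0 le_rfl (by omega) (fun _ => rfl)
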